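-- pv_equiv track=rewrite | github.com/codepoet4/ACB_tracker | app/board_detector.py | _post_process_board_state
-- ===== SOURCE A (Python) =====
-- def _post_process_board_state(board_state):
--     """
--     Ensures the board state is plausible (e.g., only one king per side)
--     before converting to FEN. This prevents 'Invalid Position' errors.
--     """
--     white_kings = []
--     black_kings = []
--     for r, rank_data in enumerate(board_state):
--         for c, piece in enumerate(rank_data):
--             if piece == 'K':
--                 white_kings.append((r, c))
--             elif piece == 'k':
--                 black_kings.append((r, c))
--
--     # If more than one white king, keep the first and demote others to Queens
--     if len(white_kings) > 1:
--         # Keep the first one found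
--         for i in range(1, len(white_kings)):
--             r, c = white_kings[i]
--             board_state[r][c] = 'Q' # A common misclassification for a king
--
--     # Same for black kings
--     if len(black_kings) > 1:
--         for i in range(1, len(black_kings)):
--             r, c = black_kings[i]
--             board_state[r][c] = 'q'
--
--     return board_state
-- ===== SOURCE B (Python) =====
-- def _post_process_board_state(board_state):
--     """Single row-major pass: demote every king after the first of its
--     colour to a queen, in place, using two seen-flags."""
--     seen_white = False
--     seen_black = False
--     for rank_data in board_state:
--         for c in range(len(rank_data)):
--             piece = rank_data[c]
--             if piece == 'K':
--                 if seen_white: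
--                     rank_data[c] = 'Q'
--                 else:
--                     seen_white = True
--             elif piece == 'k':
--                 if seen_black:
--                     rank_data[c] = 'q'
--                 else:
--                     seen_black = True
--     return board_state
-- ===== Notes on version B (the rewrite author's own statement) =====
-- stated objective: simpler
-- what changed: Replaces the collect-positions-then-demote-by-index structure (two king-position lists plus separate range(1,len) index loops) with a single row-major pass that carries two seen-flags and demotes in place, so the intermediate position lists and the second differently-shaped loops disappear.
import Mathlib
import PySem

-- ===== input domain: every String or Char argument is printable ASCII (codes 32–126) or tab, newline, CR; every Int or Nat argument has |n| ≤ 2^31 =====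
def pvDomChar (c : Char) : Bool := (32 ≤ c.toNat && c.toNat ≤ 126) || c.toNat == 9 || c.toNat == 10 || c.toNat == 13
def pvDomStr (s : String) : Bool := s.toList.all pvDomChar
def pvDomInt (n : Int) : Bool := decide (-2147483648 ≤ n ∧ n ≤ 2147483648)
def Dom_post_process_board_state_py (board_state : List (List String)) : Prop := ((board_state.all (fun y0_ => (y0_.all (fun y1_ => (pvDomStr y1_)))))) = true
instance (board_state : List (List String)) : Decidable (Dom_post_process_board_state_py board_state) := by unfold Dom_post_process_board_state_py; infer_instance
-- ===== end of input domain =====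

-- B replaces A's collect-then-demote (position lists + range(1,len) index loops) by one
-- row-major pass with two seen-flags; both Pythons mutate board_state in place the same way,
-- the equivalence proved here is about the returned value.

-- ===== PORT A =====
-- board_state[r][c] = v  (r, c always in range where A uses it)
def pvSetAt (b : List (List String)) (r c : Int) (v : String) : List (List String) :=
  PySem.List.pySetD b r (PySem.List.pySetD (PySem.List.pyGetD b r []) c v)

def post_process_board_state_py (board_state : List (List String)) : List (List String) :=
  -- collection loop: for r, rank_data in enumerate(...): for c, piece in enumerate(...)
  let wb := (PySem.List.enumerate board_state 0).foldl
    (fun (acc : List (Int × Int) × List (Int × Int)) rp =>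
      (PySem.List.enumerate rp.2 0).foldl
        (fun acc cp =>
          if cp.2 = "K" then (acc.1 ++ [(rp.1, cp.1)], acc.2)
          else if cp.2 = "k" then (acc.1, acc.2 ++ [(rp.1, cp.1)])
          else acc) acc)
    ([], [])
  let wk := wb.1
  let bk := wb.2
  let b1 := if wk.length > 1 then
      (PySem.List.pyRange 1 (wk.length : Int) 1).foldl
        (fun b i => let rc := PySem.List.pyGetD wk i (0, 0); pvSetAt b rc.1 rc.2 "Q")
        board_state
    else board_state
  let b2 := if bk.length > 1 then
      (PySem.List.pyRange 1 (bk.length : Int) 1).foldl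
        (fun b i => let rc := PySem.List.pyGetD bk i (0, 0); pvSetAt b rc.1 rc.2 "q")
        b1
    else b1
  b2

-- ===== PORT B =====
-- one pass over a row, threading the two seen-flags
def altRow : Bool → Bool → List String → List String × Bool × Bool
  | sw, sb, [] => ([], sw, sb)
  | sw, sb, p :: rest =>
    if p = "K" then
      if sw then
        let t := altRow sw sb rest; ("Q" :: t.1, t.2)
      else
        let t := altRow true sb rest; (p :: t.1, t.2)
    else if p = "k" then
      if sb then
        let t := altRow sw sb rest; ("q" :: t.1, t.2)
      else
        let t := altRow sw true rest; (p :: t.1, t.2)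
    else
      let t := altRow sw sb rest; (p :: t.1, t.2)

def altBoard : Bool → Bool → List (List String) → List (List String)
  | _, _, [] => []
  | sw, sb, row :: rest =>
    let t := altRow sw sb row
    t.1 :: altBoard t.2.1 t.2.2 rest

def post_process_board_state_py_alt (board_state : List (List String)) : List (List String) :=
  altBoard false false board_state

-- ===== PRECONDITION & SPEC =====
def Spec_post_process_board_state_py (board_state : List (List String)) (out : List (List String)) : Prop := out = post_process_board_state_py_alt board_state
instance (board_state : List (List String)) (out : List (List String)) : Decidable (Spec_post_process_board_state_py board_state out) := by unfold Spec_post_process_board_state_py; infer_instance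

-- ===== CLAIM (what is proved, stated in full; the proofs are below) =====
def Claim_equal_post_process_board_state_py : Prop := ∀ (board_state : List (List String)), Dom_post_process_board_state_py board_state → Spec_post_process_board_state_py board_state (post_process_board_state_py board_state)

-- ===== LEMMAS AND PROOFS =====

-- column indices of piece s in a row, root-relative
def cols (s : String) : List String → List Nat
  | [] => []
  | p :: r => if p = s then 0 :: (cols s r).map (· + 1) else (cols s r).map (· + 1)

-- (row, col) positions of piece s on the board, row-major
def pos (s : String) : List (List String) → List (Nat × Nat)
  | [] => []
  | row :: rest =>
      ((cols s row).map fun c => (0, c)) ++ ((pos s rest).map fun rc => (rc.1 + 1, rc.2))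

def setN (b : List (List String)) (rc : Nat × Nat) (v : String) : List (List String) :=
  b.set rc.1 ((b.getD rc.1 []).set rc.2 v)

def updN (v : String) (ps : List (Nat × Nat)) (b : List (List String)) : List (List String) :=
  ps.foldl (fun b rc => setN b rc v) b

def setColsN (v : String) (cs : List Nat) (row : List String) : List String :=
  cs.foldl (fun r c => r.set c v) row

def dropIf (seen : Bool) (l : List α) : List α := if seen then l else l.drop 1


-- basic shape lemmas
theorem setColsN_shift (v : String) (cs : List Nat) (x : String) (xs : List String) :
    setColsN v (cs.map (· + 1)) (x :: xs) = x :: setColsN v cs xs := by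
  induction cs generalizing x xs with
  | nil => rfl
  | cons c cs ih => simp [setColsN, List.foldl_cons] at *; exact ih _ _

theorem updN_shift (v : String) (ps : List (Nat × Nat)) (x : List String) (xs : List (List String)) :
    updN v (ps.map fun rc => (rc.1 + 1, rc.2)) (x :: xs) = x :: updN v ps xs := by
  induction ps generalizing x xs with
  | nil => rfl
  | cons p ps ih => simp [updN, setN, List.foldl_cons] at *; exact ih _ _

theorem updN_row0 (v : String) (cs : List Nat) (x : List String) (xs : List (List String)) :
    updN v (cs.map fun c => (0, c)) (x :: xs) = setColsN v cs x :: xs := by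
  induction cs generalizing x with
  | nil => rfl
  | cons c cs ih => simp [updN, setN, setColsN, List.foldl_cons] at *; exact ih _

theorem updN_append (v : String) (l m : List (Nat × Nat)) (b : List (List String)) :
    updN v (l ++ m) b = updN v m (updN v l b) := by
  simp [updN, List.foldl_append]

theorem dropIf_map (s : Bool) (f : α → β) (l : List α) :
    dropIf s (l.map f) = (dropIf s l).map f := by
  cases s <;> cases l <;> simp [dropIf]

theorem dropIf_true (l : List α) : dropIf true l = l := rfl
theorem dropIf_false (l : List α) : dropIf false l = l.drop 1 := rfl

theorem dropIf_append0 (sw : Bool) (cs : List Nat) (ps : List (Nat × Nat)) :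
    dropIf sw ((cs.map fun c => ((0 : Nat), c)) ++ ps.map (fun rc => (rc.1 + 1, rc.2)))
      = (dropIf sw cs).map (fun c => ((0 : Nat), c))
        ++ (dropIf (sw || !cs.isEmpty) ps).map (fun rc => (rc.1 + 1, rc.2)) := by
  cases sw with
  | true => simp [dropIf]
  | false =>
    cases cs with
    | nil => simp [dropIf]
    | cons c cs => simp [dropIf]

theorem setColsN_cons0 (v : String) (cs : List Nat) (x : String) (xs : List String) :
    setColsN v (0 :: cs) (x :: xs) = setColsN v cs (v :: xs) := by
  simp [setColsN]

-- the per-row characterisation of B's single pass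
theorem altRow_eq (row : List String) (sw sb : Bool) :
    altRow sw sb row =
      (setColsN "q" (dropIf sb (cols "k" row)) (setColsN "Q" (dropIf sw (cols "K" row)) row),
       sw || !(cols "K" row).isEmpty, sb || !(cols "k" row).isEmpty) := by
  induction row generalizing sw sb with
  | nil => cases sw <;> cases sb <;> rfl
  | cons p rest ih =>
    by_cases hK : p = "K"
    · subst hK
      cases sw <;>
        simp [altRow, cols, ih, dropIf_true, dropIf_false, dropIf_map,
              setColsN_cons0, setColsN_shift]
    · by_cases hk : p = "k"
      · subst hk
        cases sb <;>
          simp [altRow, cols, hK, ih, dropIf_true, dropIf_false, dropIf_map,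
                setColsN_cons0, setColsN_shift]
      · simp [altRow, cols, hK, hk, ih, dropIf_map, setColsN_shift]

-- the board-level characterisation: B = A's demotions applied to the suffix lists
theorem altBoard_eq (board : List (List String)) (sw sb : Bool) :
    altBoard sw sb board =
      updN "q" (dropIf sb (pos "k" board)) (updN "Q" (dropIf sw (pos "K" board)) board) := by
  induction board generalizing sw sb with
  | nil => cases sw <;> cases sb <;> rfl
  | cons row rest ih =>
    simp only [pos, dropIf_append0, updN_append, altBoard, altRow_eq]
    rw [updN_row0, updN_shift, updN_row0, updN_shift, ih]

-- A's inner collection loop, characterised by cols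
theorem collect_inner (r : Int) (row : List String) (c : Nat)
    (acc : List (Int × Int) × List (Int × Int)) :
    (PySem.List.enumerate row (c : Int)).foldl
      (fun acc cp =>
        if cp.2 = "K" then (acc.1 ++ [(r, cp.1)], acc.2)
        else if cp.2 = "k" then (acc.1, acc.2 ++ [(r, cp.1)]) else acc) acc
    = (acc.1 ++ (cols "K" row).map (fun k => (r, ((c + k : Nat) : Int))),
       acc.2 ++ (cols "k" row).map (fun k => (r, ((c + k : Nat) : Int)))) := by
  induction row generalizing c acc with
  | nil => simp [PySem.List.enumerate_nil, cols]
  | cons p rest ih =>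
    rw [PySem.List.enumerate_cons, List.foldl_cons]
    have hc : ((c : Int) + 1) = ((c + 1 : Nat) : Int) := by push_cast; ring
    have harith : ∀ k : Nat, c + 1 + k = c + (k + 1) := by omega
    by_cases hK : p = "K"
    · subst hK
      rw [hc, ih (c + 1)]
      simp [cols, List.map_map, Function.comp_def, harith]
    · by_cases hk : p = "k"
      · subst hk
        rw [hc, ih (c + 1)]
        simp [cols, hK, List.map_map, Function.comp_def, harith]
      · rw [hc, ih (c + 1)]
        simp [cols, hK, hk, List.map_map, Function.comp_def, harith]

theorem collect_inner0 (r : Int) (row : List String)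
    (acc : List (Int × Int) × List (Int × Int)) :
    (PySem.List.enumerate row 0).foldl
      (fun acc cp =>
        if cp.2 = "K" then (acc.1 ++ [(r, cp.1)], acc.2)
        else if cp.2 = "k" then (acc.1, acc.2 ++ [(r, cp.1)]) else acc) acc
    = (acc.1 ++ (cols "K" row).map (fun (k : Nat) => (r, (k : Int))),
       acc.2 ++ (cols "k" row).map (fun (k : Nat) => (r, (k : Int)))) := by
  have h := collect_inner r row 0 acc
  simp only [Nat.cast_zero, Nat.zero_add] at h
  exact h

-- A's full collection loop, characterised by pos
theorem collect_outer (board : List (List String)) (r : Nat)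
    (acc : List (Int × Int) × List (Int × Int)) :
    (PySem.List.enumerate board (r : Int)).foldl
      (fun acc rp =>
        (PySem.List.enumerate rp.2 0).foldl
          (fun acc cp =>
            if cp.2 = "K" then (acc.1 ++ [(rp.1, cp.1)], acc.2)
            else if cp.2 = "k" then (acc.1, acc.2 ++ [(rp.1, cp.1)]) else acc) acc) acc
    = (acc.1 ++ (pos "K" board).map (fun rc => (((r + rc.1 : Nat) : Int), (rc.2 : Int))),
       acc.2 ++ (pos "k" board).map (fun rc => (((r + rc.1 : Nat) : Int), (rc.2 : Int)))) := by
  induction board generalizing r acc with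
  | nil => simp [PySem.List.enumerate_nil, pos]
  | cons row rest ih =>
    rw [PySem.List.enumerate_cons, List.foldl_cons]
    dsimp only
    have hr : ((r : Int) + 1) = ((r + 1 : Nat) : Int) := by push_cast; ring
    have harith : ∀ k : Nat, r + 1 + k = r + (k + 1) := by omega
    rw [collect_inner0, hr, ih (r + 1)]
    simp [pos, List.map_map, Function.comp_def, harith]

-- the Int-indexed demotion fold is updN on the Nat positions
theorem upd_bridge (v : String) (ps : List (Nat × Nat)) (b : List (List String)) :
    (ps.map (fun rc => ((rc.1 : Int), (rc.2 : Int)))).foldl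
      (fun b rc => pvSetAt b rc.1 rc.2 v) b = updN v ps b := by
  simp [List.foldl_map, updN, pvSetAt, setN]

theorem drop_one_short (l : List (Nat × Nat)) (h : ¬ l.length > 1) : l.drop 1 = [] := by
  rw [List.drop_eq_nil_iff]; omega

theorem demote_fold (v : String) (ps : List (Nat × Nat)) (b : List (List String)) :
    (if (ps.map (fun rc => ((rc.1 : Int), (rc.2 : Int)))).length > 1 then
       (PySem.List.pyRange 1 (((ps.map (fun rc => ((rc.1 : Int), (rc.2 : Int)))).length : Int)) 1).foldl
         (fun bb i =>
           pvSetAt bb (PySem.List.pyGetD (ps.map (fun rc => ((rc.1 : Int), (rc.2 : Int)))) i (0, 0)).1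
             (PySem.List.pyGetD (ps.map (fun rc => ((rc.1 : Int), (rc.2 : Int)))) i (0, 0)).2 v) b
     else b) = updN v (ps.drop 1) b := by
  by_cases h : (ps.map (fun rc => ((rc.1 : Int), (rc.2 : Int)))).length > 1
  · rw [if_pos h,
      PySem.List.foldl_pyRange_pyGetD' (ps.map (fun rc => ((rc.1 : Int), (rc.2 : Int)))) (0, 0)
        (fun bb rc => pvSetAt bb rc.1 rc.2 v) b (by norm_num : (0 : Int) ≤ 1)]
    rw [show ((1 : Int).toNat) = 1 from rfl, ← List.map_drop, upd_bridge]
  · rw [if_neg h, drop_one_short ps (by simpa using h)]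
    simp [updN]

theorem main_eq (board : List (List String)) :
    post_process_board_state_py board = post_process_board_state_py_alt board := by
  have hcol := collect_outer board 0 ([], [])
  simp only [Nat.cast_zero, zero_add, List.nil_append] at hcol
  unfold post_process_board_state_py
  simp only [hcol]
  simp only [demote_fold]
  rw [show post_process_board_state_py_alt board = altBoard false false board from rfl,
    altBoard_eq, dropIf_false, dropIf_false]

-- ===== VERDICT (by name: the statement is the Claim_ definition above) =====
theorem post_process_board_state_py_spec : Claim_equal_post_process_board_state_py := by
  intro board _
  unfold Spec_post_process_board_state_py
  exact main_eq board
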